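-- pv_equiv track=rewrite | github.com/Anionex/Paper2Any | dataflow_agent/utils_markdown_sections.py | _rebalance_batches_to_count
-- ===== SOURCE A (Python) =====
-- from typing import Any, Dict, List
--
-- def _rebalance_batches_to_count(
--     batches: List[List[Dict[str, Any]]],
--     target_count: int,
-- ) -> List[List[Dict[str, Any]]]:
--     out = [list(batch) for batch in batches if batch]
--     while len(out) < target_count:
--         split_idx = max(
--             range(len(out)),
--             key=lambda idx: (len(out[idx]), sum(s.get("estimated_tokens", 0) for s in out[idx])),
--         )
--         batch = out[split_idx]
--         if len(batch) <= 1: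
--             break
--         mid = len(batch) // 2
--         out[split_idx:split_idx + 1] = [batch[:mid], batch[mid:]]
--     return out
-- ===== SOURCE B (Python) =====
-- from typing import Any, Dict, List
--
-- def _path_lt(p, q):
--     # lexicographic '<' on position paths
--     for x, y in zip(p, q):
--         if x != y:
--             return x < y
--     return len(p) < len(q)
--
-- def _key_lt(a, b):
--     # '<' on (neg_len, neg_tokens, path): the head of a list sorted by this
--     # is exactly the batch A's argmax would pick next
--     if a[0] != b[0]:
--         return a[0] < b[0]
--     if a[1] != b[1]:
--         return a[1] < b[1]
--     return _path_lt(a[2], b[2])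
--
-- def _insort(items, item):
--     i = 0
--     while i < len(items) and _key_lt(items[i], item):
--         i += 1
--     items.insert(i, item)
--
-- def _rebalance_batches_to_count(
--     batches: List[List[Dict[str, Any]]],
--     target_count: int,
-- ) -> List[List[Dict[str, Any]]]:
--     # Priority list: kept sorted so the batch to split is always items[0];
--     # each piece carries its position path so original order is restored at the end.
--     items = []
--     for pos, b in enumerate(batches):
--         if b:
--             tot = sum(s.get("estimated_tokens", 0) for s in b)
--             _insort(items, (-len(b), -tot, [pos], list(b)))
--     while items and len(items) < target_count:
--         neglen, negsum, path, batch = items[0]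
--         if len(batch) <= 1:
--             break
--         items.pop(0)
--         mid = len(batch) // 2
--         left, right = batch[:mid], batch[mid:]
--         ltot = sum(s.get("estimated_tokens", 0) for s in left)
--         _insort(items, (-mid, -ltot, path + [0], left))
--         _insort(items, (mid - len(batch), ltot + negsum, path + [1], right))
--     ordered = []
--     for it in items:
--         i = 0
--         while i < len(ordered) and _path_lt(ordered[i][2], it[2]):
--             i += 1
--         ordered.insert(i, it)
--     return [it[3] for it in ordered]
-- ===== Notes on version B (the rewrite author's own statement) =====
-- stated objective: alternative
-- what changed: B replaces A's per-iteration argmax-with-re-summing scan with a priority list kept sorted by (-len, -token_sum, position path): the batch to split is always the head, each split's two halves are inserted back in order with their cached keys, and the original positional order is reconstructed at the end from the carried position paths.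
import Mathlib
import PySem

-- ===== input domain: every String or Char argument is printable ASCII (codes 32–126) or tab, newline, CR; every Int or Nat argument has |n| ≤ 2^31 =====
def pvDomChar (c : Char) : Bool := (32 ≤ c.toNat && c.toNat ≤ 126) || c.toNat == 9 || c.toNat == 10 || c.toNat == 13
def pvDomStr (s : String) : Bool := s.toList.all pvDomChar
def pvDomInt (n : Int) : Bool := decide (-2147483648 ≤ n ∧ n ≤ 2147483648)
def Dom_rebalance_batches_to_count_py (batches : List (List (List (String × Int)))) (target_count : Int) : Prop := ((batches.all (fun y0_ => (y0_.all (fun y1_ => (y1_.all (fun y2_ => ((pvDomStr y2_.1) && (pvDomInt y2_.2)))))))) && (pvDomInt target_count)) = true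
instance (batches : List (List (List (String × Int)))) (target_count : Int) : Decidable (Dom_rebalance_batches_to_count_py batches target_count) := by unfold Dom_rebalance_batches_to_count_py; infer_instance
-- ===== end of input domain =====

-- B keeps a priority list sorted by (-len, -token_sum, position path) so the batch to
-- split is always the head, and restores original order at the end via the carried
-- paths; an alternative organisation of the work, not claimed faster.
-- Pre_ excludes only inputs where Python A raises (all batches empty, target_count > 0).


-- ===== PORT A =====
-- sum(s.get("estimated_tokens", 0) for s in batch)
def pvToksA (b : List (List (String × Int))) : Int :=
  b.foldl (fun acc s => acc + PySem.Dict.getD (PySem.Dict.mk s) "estimated_tokens" 0) 0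

-- key=lambda idx: (len(out[idx]), sum(...)); out[idx] read with an in-range index
def pvKeyA (out : List (List (List (String × Int)))) (idx : Nat) : Int × Int :=
  let b := out.getD idx []
  ((b.length : Int), pvToksA b)

-- Python tuple '>' on (int, int)
def pvGtA (a b : Int × Int) : Bool := a.1 > b.1 || (a.1 == b.1 && a.2 > b.2)

-- max(range(len(out)), key=...): first index with maximal key
def pvArgmaxA (out : List (List (List (String × Int)))) : Nat :=
  (List.range out.length).foldl
    (fun best idx => if pvGtA (pvKeyA out idx) (pvKeyA out best) then idx else best) 0

-- the while loop; fuel = target_count - len(out) (each iteration grows out by 1)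
def pvLoopA : Nat → Int → List (List (List (String × Int))) → List (List (List (String × Int)))
  | 0, _, out => out
  | fuel+1, target, out =>
    if (out.length : Int) < target then
      let i := pvArgmaxA out
      let batch := out.getD i []
      if batch.length ≤ 1 then out
      else
        -- mid = len(batch) // 2 (nonnegative, so Nat division is exact Python //)
        let mid := batch.length / 2
        pvLoopA fuel target (out.take i ++ [batch.take mid, batch.drop mid] ++ out.drop (i+1))
    else out

def rebalance_batches_to_count_py (batches : List (List (List (String × Int)))) (target_count : Int) : List (List (List (String × Int))) :=
  let out := batches.filter (fun b => !b.isEmpty)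
  pvLoopA (target_count - out.length).toNat target_count out

-- ===== PORT B =====
-- an item is (neg_len, neg_tokens, path, batch)
abbrev PVItem := Int × Int × List Int × List (List (String × Int))

def pvToksB (b : List (List (String × Int))) : Int :=
  b.foldl (fun acc s => acc + PySem.Dict.getD (PySem.Dict.mk s) "estimated_tokens" 0) 0

-- _path_lt: lexicographic '<' on paths (zip stops at the shorter list)
def pvPathLt : List Int → List Int → Bool
  | [], [] => false
  | [], _ :: _ => true
  | _ :: _, [] => false
  | x :: p, y :: q => if x ≠ y then decide (x < y) else pvPathLt p q

-- _key_lt on (neg_len, neg_tokens, path)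
def pvKeyLt (a b : PVItem) : Bool :=
  if a.1 ≠ b.1 then decide (a.1 < b.1)
  else if a.2.1 ≠ b.2.1 then decide (a.2.1 < b.2.1)
  else pvPathLt a.2.2.1 b.2.2.1

-- _insort: skip while items[i] < item, insert there
def pvInsort : List PVItem → PVItem → List PVItem
  | [], it => [it]
  | x :: xs, it => if pvKeyLt x it then x :: pvInsort xs it else it :: x :: xs

-- the enumerate/insort initialisation loop
def pvInitB (batches : List (List (List (String × Int)))) : List PVItem :=
  (PySem.List.enumerate batches 0).foldl
    (fun items pb =>
      if pb.2.isEmpty then items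
      else pvInsort items (-(pb.2.length : Int), -(pvToksB pb.2), [pb.1], pb.2)) []

-- the main while loop; fuel = target_count - len(items)
def pvLoopB : Nat → Int → List PVItem → List PVItem
  | 0, _, items => items
  | fuel+1, target, items =>
    match items with
    | [] => []
    | it :: rest =>
      if ((it :: rest).length : Int) < target then
        if it.2.2.2.length ≤ 1 then it :: rest
        else
          let batch := it.2.2.2
          let mid := batch.length / 2
          let left := batch.take mid
          let ltot := pvToksB left
          pvLoopB fuel target
            (pvInsort (pvInsort rest (-(mid : Int), -ltot, it.2.2.1 ++ [0], left))
              ((mid : Int) - (batch.length : Int), ltot + it.2.1, it.2.2.1 ++ [1], batch.drop mid))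
      else it :: rest

-- the final reordering loop: insert by _path_lt
def pvOrderIns : List PVItem → PVItem → List PVItem
  | [], it => [it]
  | x :: xs, it => if pvPathLt x.2.2.1 it.2.2.1 then x :: pvOrderIns xs it else it :: x :: xs

def rebalance_batches_to_count_py_alt (batches : List (List (List (String × Int)))) (target_count : Int) : List (List (List (String × Int))) :=
  let items := pvInitB batches
  ((pvLoopB (target_count - items.length).toNat target_count items).foldl pvOrderIns []).map
    (fun it => it.2.2.2)

-- ===== PRECONDITION & SPEC =====
-- Pre_ excludes exactly the inputs where A raises ValueError: all batches empty and
-- target_count > 0 (max() over an empty range); B returns [] there.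
def Pre_rebalance_batches_to_count_py (batches : List (List (List (String × Int)))) (target_count : Int) : Prop :=
  (∃ b ∈ batches, b ≠ []) ∨ target_count ≤ 0
instance (batches : List (List (List (String × Int)))) (target_count : Int) : Decidable (Pre_rebalance_batches_to_count_py batches target_count) := by unfold Pre_rebalance_batches_to_count_py; infer_instance

def pvWitness_rebalance_batches_to_count_py : (List (List (List (String × Int)))) × Int :=
  ([[[("estimated_tokens", 3)], [("estimated_tokens", 5)]], [[("estimated_tokens", 1)]]], 3)

def Spec_rebalance_batches_to_count_py (batches : List (List (List (String × Int)))) (target_count : Int) (out : List (List (List (String × Int)))) : Prop := out = rebalance_batches_to_count_py_alt batches target_count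
instance (batches : List (List (List (String × Int)))) (target_count : Int) (out : List (List (List (String × Int)))) : Decidable (Spec_rebalance_batches_to_count_py batches target_count out) := by unfold Spec_rebalance_batches_to_count_py; infer_instance

-- ===== CLAIM (what is proved, stated in full; the proofs are below) =====
def Claim_equal_rebalance_batches_to_count_py : Prop := ∀ (batches : List (List (List (String × Int)))) (target_count : Int), Dom_rebalance_batches_to_count_py batches target_count → Pre_rebalance_batches_to_count_py batches target_count → Spec_rebalance_batches_to_count_py batches target_count (rebalance_batches_to_count_py batches target_count)

-- ===== LEMMAS AND PROOFS =====


-- ---- basic facts about the Python tuple comparison pvGtA ----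
theorem pvGtA_iff (a b : Int × Int) :
    pvGtA a b = true ↔ (b.1 < a.1 ∨ (a.1 = b.1 ∧ b.2 < a.2)) := by
  simp [pvGtA]

theorem pvGtA_connex (a b : Int × Int) (h : a ≠ b) : pvGtA a b = true ∨ pvGtA b a = true := by
  rw [pvGtA_iff, pvGtA_iff]
  rcases a with ⟨a1, a2⟩; rcases b with ⟨b1, b2⟩
  simp only [Prod.mk.injEq, ne_eq] at h ⊢
  omega

theorem pvGtA_irrefl (a : Int × Int) : pvGtA a a = false := by
  simp [pvGtA]

theorem pvGtA_transL (a b c : Int × Int) (h1 : pvGtA a b = true) (h2 : pvGtA b c = true) :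
    pvGtA a c = true := by
  rw [pvGtA_iff] at *; omega

-- ---- pvPathLt is a strict linear order on List Int ----
theorem pvPathLt_asymm (p q : List Int) (h1 : pvPathLt p q = true) (h2 : pvPathLt q p = true) :
    False := by
  induction p generalizing q with
  | nil =>
    cases q with
    | nil => simp [pvPathLt] at h1
    | cons y q => simp [pvPathLt] at h2
  | cons x p ih =>
    cases q with
    | nil => simp [pvPathLt] at h1
    | cons y q =>
      by_cases hxy : x = y
      · subst hxy; simp [pvPathLt] at h1 h2; exact ih q h1 h2
      · simp [pvPathLt, hxy, Ne.symm hxy] at h1 h2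
        omega

theorem pvPathLt_trans (p q r : List Int) (h1 : pvPathLt p q = true) (h2 : pvPathLt q r = true) :
    pvPathLt p r = true := by
  induction p generalizing q r with
  | nil =>
    cases q with
    | nil => simp [pvPathLt] at h1
    | cons y q => cases r with
      | nil => simp [pvPathLt] at h2
      | cons z r => rfl
  | cons x p ih =>
    cases q with
    | nil => simp [pvPathLt] at h1
    | cons y q =>
      cases r with
      | nil => simp [pvPathLt] at h2
      | cons z r =>
        by_cases hxy : x = y <;> by_cases hyz : y = z
        · subst hxy; subst hyz
          simp [pvPathLt] at h1 h2 ⊢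
          exact ih q r h1 h2
        · subst hxy
          simp [pvPathLt, hyz] at h2 ⊢
          exact h2
        · subst hyz
          simp [pvPathLt, hxy] at h1 ⊢
          exact h1
        · simp [pvPathLt, hxy, hyz] at h1 h2
          have hxz : x < z := lt_trans h1 h2
          simp [pvPathLt, show x ≠ z by omega]
          omega

-- ---- pvLtAt: 'strictly below at a position inside both lists' ----
def pvLtAt (p q : List Int) : Prop :=
  ∃ k, ∃ (_ : k < p.length) (_ : k < q.length), p.take k = q.take k ∧ p[k] < q[k]

theorem pvLtAt_pathLt (p q : List Int) (h : pvLtAt p q) : pvPathLt p q = true := by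
  obtain ⟨k, h1, h2, htake, hlt⟩ := h
  induction p generalizing q k with
  | nil => simp at h1
  | cons x p ih =>
    cases q with
    | nil => simp at h2
    | cons y q =>
      cases k with
      | zero =>
        simp at hlt
        simp [pvPathLt, show x ≠ y by omega]
        omega
      | succ k =>
        simp [List.take_succ_cons] at htake
        obtain ⟨hxy, htk⟩ := htake
        subst hxy
        simp at h1 h2 hlt
        simp [pvPathLt]
        exact ih q k h1 h2 htk hlt

theorem pvLtAt_append_left (p q a : List Int) (h : pvLtAt p q) : pvLtAt (p ++ a) q := by
  obtain ⟨k, h1, h2, htake, hlt⟩ := h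
  refine ⟨k, by simp; omega, h2, ?_, ?_⟩
  · rw [List.take_append_of_le_length (le_of_lt h1)]; exact htake
  · rw [List.getElem_append_left h1]; exact hlt

theorem pvLtAt_append_right (p q a : List Int) (h : pvLtAt p q) : pvLtAt p (q ++ a) := by
  obtain ⟨k, h1, h2, htake, hlt⟩ := h
  refine ⟨k, h1, by simp; omega, ?_, ?_⟩
  · rw [List.take_append_of_le_length (le_of_lt h2)]; exact htake
  · rw [List.getElem_append_left h2]; exact hlt

theorem pvLtAt_child (p : List Int) (x y : Int) (h : x < y) : pvLtAt (p ++ [x]) (p ++ [y]) := by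
  refine ⟨p.length, by simp, by simp, ?_, ?_⟩
  · rw [List.take_left', List.take_left'] <;> rfl
  · rw [List.getElem_concat_length, List.getElem_concat_length] <;> simp [h]

-- ---- pvKeyLt is a strict order; comparability comes from distinct keys ----
theorem pvKeyLt_iff (a b : PVItem) :
    pvKeyLt a b = true ↔
      (a.1 < b.1 ∨ (a.1 = b.1 ∧ (a.2.1 < b.2.1 ∨ (a.2.1 = b.2.1 ∧ pvPathLt a.2.2.1 b.2.2.1 = true)))) := by
  unfold pvKeyLt
  split_ifs with h h' <;> simp_all

theorem pvKeyLt_asymm (a b : PVItem) (h1 : pvKeyLt a b = true) (h2 : pvKeyLt b a = true) :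
    False := by
  rw [pvKeyLt_iff] at h1 h2
  rcases h1 with h1 | ⟨e1, h1⟩
  · rcases h2 with h2 | ⟨e2, _⟩ <;> omega
  · rcases h2 with h2 | ⟨e2, h2⟩
    · omega
    · rcases h1 with h1 | ⟨f1, h1⟩ <;> rcases h2 with h2 | ⟨f2, h2⟩
      · omega
      · omega
      · omega
      · exact pvPathLt_asymm _ _ h1 h2

theorem pvKeyLt_trans (a b c : PVItem) (h1 : pvKeyLt a b = true) (h2 : pvKeyLt b c = true) :
    pvKeyLt a c = true := by
  rw [pvKeyLt_iff] at h1 h2 ⊢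
  rcases h1 with h1 | ⟨e1, h1⟩
  · rcases h2 with h2 | ⟨e2, _⟩ <;> [left; left] <;> omega
  · rcases h2 with h2 | ⟨e2, h2⟩
    · left; omega
    · right
      refine ⟨by omega, ?_⟩
      rcases h1 with h1 | ⟨f1, h1⟩
      · rcases h2 with h2 | ⟨f2, _⟩ <;> left <;> omega
      · rcases h2 with h2 | ⟨f2, h2⟩
        · left; omega
        · right; exact ⟨by omega, pvPathLt_trans _ _ _ h1 h2⟩

theorem pvKeyLt_connex (a b : PVItem)
    (h : pvPathLt a.2.2.1 b.2.2.1 = true ∨ pvPathLt b.2.2.1 a.2.2.1 = true) :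
    pvKeyLt a b = true ∨ pvKeyLt b a = true := by
  rw [pvKeyLt_iff, pvKeyLt_iff]
  rcases lt_trichotomy a.1 b.1 with h1 | h1 | h1
  · left; left; omega
  · rcases lt_trichotomy a.2.1 b.2.1 with h2 | h2 | h2
    · left; right; exact ⟨h1, by omega⟩
    · rcases h with h | h
      · left; right; exact ⟨h1, Or.inr ⟨h2, h⟩⟩
      · right; right; exact ⟨h1.symm, Or.inr ⟨h2.symm, h⟩⟩
    · right; right; exact ⟨h1.symm, by omega⟩
  · right; left; omega


-- ---- decorated states: A's list elements tagged with their position path ----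
abbrev PVBatch := List (List (String × Int))

def pvDecor (pb : List Int × PVBatch) : PVItem :=
  (-(pb.2.length : Int), -(pvToksA pb.2), pb.1, pb.2)

def pvAKey (pb : List Int × PVBatch) : Int × Int := ((pb.2.length : Int), pvToksA pb.2)

theorem pvKeyLt_decor (a b : List Int × PVBatch) :
    pvKeyLt (pvDecor a) (pvDecor b) = true ↔
      (pvGtA (pvAKey a) (pvAKey b) = true ∨ (pvAKey a = pvAKey b ∧ pvPathLt a.1 b.1 = true)) := by
  rw [pvKeyLt_iff, pvGtA_iff]
  simp only [pvDecor, pvAKey, Prod.mk.injEq]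
  constructor
  · rintro (h | ⟨e, h | ⟨f, h⟩⟩)
    · left; left; omega
    · left; right; omega
    · right; exact ⟨⟨by omega, by omega⟩, h⟩
  · rintro ((h | ⟨e, h⟩) | ⟨⟨e, f⟩, h⟩)
    · left; omega
    · right; exact ⟨by omega, by omega⟩
    · right; exact ⟨by omega, Or.inr ⟨by omega, h⟩⟩

-- ---- generic sorted insertion; pvInsort and pvOrderIns are instances of it ----
def pvInsG (lt : PVItem → PVItem → Bool) : List PVItem → PVItem → List PVItem
  | [], it => [it]
  | x :: xs, it => if lt x it then x :: pvInsG lt xs it else it :: x :: xs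

theorem pvInsort_eq (l : List PVItem) (it : PVItem) : pvInsort l it = pvInsG pvKeyLt l it := by
  induction l with
  | nil => rfl
  | cons x xs ih => simp [pvInsort, pvInsG, ih]

theorem pvOrderIns_eq (l : List PVItem) (it : PVItem) :
    pvOrderIns l it = pvInsG (fun a b => pvPathLt a.2.2.1 b.2.2.1) l it := by
  induction l with
  | nil => rfl
  | cons x xs ih => simp [pvOrderIns, pvInsG, ih]

theorem pvInsG_perm (lt : PVItem → PVItem → Bool) (l : List PVItem) (it : PVItem) :
    (pvInsG lt l it).Perm (it :: l) := by
  induction l with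
  | nil => rfl
  | cons x xs ih =>
    simp only [pvInsG]
    split
    · exact (ih.cons x).trans (List.Perm.swap it x xs)
    · rfl

theorem pvInsG_sorted (lt : PVItem → PVItem → Bool)
    (htr : ∀ a b c, lt a b = true → lt b c = true → lt a c = true)
    (l : List PVItem) (it : PVItem)
    (hs : l.Pairwise (fun a b => lt a b = true))
    (hcmp : ∀ y ∈ l, lt it y = true ∨ lt y it = true) :
    (pvInsG lt l it).Pairwise (fun a b => lt a b = true) := by
  induction l with
  | nil => simp [pvInsG]
  | cons x xs ih =>
    rw [List.pairwise_cons] at hs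
    simp only [pvInsG]
    split
    · rename_i hxit
      rw [List.pairwise_cons]
      refine ⟨?_, ih hs.2 (fun y hy => hcmp y (List.mem_cons_of_mem _ hy))⟩
      intro a ha
      have := (pvInsG_perm lt xs it).mem_iff.mp ha
      rcases List.mem_cons.mp this with rfl | h
      · exact hxit
      · exact hs.1 a h
    · rename_i hxit
      have hitx : lt it x = true := by
        rcases hcmp x List.mem_cons_self with h | h
        · exact h
        · exact absurd h hxit
      rw [List.pairwise_cons]
      refine ⟨?_, by rw [List.pairwise_cons]; exact hs⟩
      intro a ha
      rcases List.mem_cons.mp ha with rfl | h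
      · exact hitx
      · exact htr _ _ _ hitx (hs.1 a h)

-- insertion by a fold, with pairwise-comparable inputs: sorted + permutation
theorem pvInsG_fold (lt : PVItem → PVItem → Bool)
    (htr : ∀ a b c, lt a b = true → lt b c = true → lt a c = true) :
    ∀ (l acc : List PVItem),
      acc.Pairwise (fun a b => lt a b = true) →
      l.Pairwise (fun a b => lt a b = true ∨ lt b a = true) →
      (∀ x ∈ acc, ∀ y ∈ l, lt x y = true ∨ lt y x = true) →
      (l.foldl (pvInsG lt) acc).Pairwise (fun a b => lt a b = true) ∧
        (l.foldl (pvInsG lt) acc).Perm (acc ++ l) := by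
  intro l
  induction l with
  | nil => intro acc hs _ _; exact ⟨hs, by simp⟩
  | cons x xs ih =>
    intro acc hs hl hcmp
    rw [List.pairwise_cons] at hl
    simp only [List.foldl_cons]
    have hsort' : (pvInsG lt acc x).Pairwise (fun a b => lt a b = true) :=
      pvInsG_sorted lt htr acc x hs
        (fun y hy => (hcmp y hy x List.mem_cons_self).symm)
    have hcmp' : ∀ a ∈ pvInsG lt acc x, ∀ y ∈ xs, lt a y = true ∨ lt y a = true := by
      intro a ha y hy
      rcases List.mem_cons.mp ((pvInsG_perm lt acc x).mem_iff.mp ha) with rfl | h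
      · exact hl.1 y hy
      · exact hcmp a h y (List.mem_cons_of_mem _ hy)
    obtain ⟨h1, h2⟩ := ih (pvInsG lt acc x) hsort' hl.2 hcmp'
    refine ⟨h1, h2.trans ?_⟩
    have hp : (pvInsG lt acc x ++ xs).Perm (x :: (acc ++ xs)) := by
      simpa using (pvInsG_perm lt acc x).append_right xs
    exact hp.trans List.perm_middle.symm


-- ---- characterisation of A's max(range(n), key=...) as a first-maximum ----
theorem pvArgmax_fold_spec (key : Nat → Int × Int) :
    ∀ (l : List Nat) (best : Nat), (best :: l).Pairwise (· < ·) →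
      (l.foldl (fun b i => if pvGtA (key i) (key b) then i else b) best) ∈ best :: l ∧
      ∀ j ∈ best :: l, j ≠ (l.foldl (fun b i => if pvGtA (key i) (key b) then i else b) best) →
        pvGtA (key (l.foldl (fun b i => if pvGtA (key i) (key b) then i else b) best)) (key j) = true ∨
          (key (l.foldl (fun b i => if pvGtA (key i) (key b) then i else b) best) = key j ∧
            (l.foldl (fun b i => if pvGtA (key i) (key b) then i else b) best) < j) := by
  intro l
  induction l with
  | nil =>
    intro best _
    refine ⟨List.mem_cons_self, ?_⟩
    intro j hj hne
    rcases List.mem_cons.mp hj with rfl | h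
    · exact absurd rfl hne
    · simp at h
  | cons x xs ih =>
    intro best hpw
    rw [List.pairwise_cons] at hpw
    have hbx : best < x := hpw.1 x List.mem_cons_self
    obtain ⟨hx, hxs⟩ := List.pairwise_cons.mp hpw.2
    simp only [List.foldl_cons]
    by_cases hgt : pvGtA (key x) (key best) = true
    · rw [if_pos hgt]
      obtain ⟨hmem, hspec⟩ := ih x hpw.2
      set r := xs.foldl (fun b i => if pvGtA (key i) (key b) then i else b) x with hr
      constructor
      · exact List.mem_cons_of_mem _ hmem
      · intro j hj hne
        rcases List.mem_cons.mp hj with rfl | h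
        · by_cases hrx : r = x
          · left; rw [hrx]; exact hgt
          · rcases hspec x List.mem_cons_self (fun e => hrx e.symm) with h' | ⟨h', _⟩
            · left; exact pvGtA_transL _ _ _ h' hgt
            · left; rw [h']; exact hgt
        · exact hspec j h hne
    · rw [if_neg hgt]
      have hpw' : (best :: xs).Pairwise (· < ·) :=
        List.pairwise_cons.mpr ⟨fun a ha => lt_trans hbx (hx a ha), hxs⟩
      obtain ⟨hmem, hspec⟩ := ih best hpw'
      have hbx_key : pvGtA (key best) (key x) = true ∨ key best = key x := by
        by_cases he : key x = key best
        · right; exact he.symm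
        · rcases pvGtA_connex _ _ he with h' | h'
          · exact absurd h' hgt
          · left; exact h'
      rw [show (List.foldl (fun b i => if pvGtA (key i) (key b) = true then i else b) best xs)
            = xs.foldl (fun b i => if pvGtA (key i) (key b) then i else b) best from rfl] at *
      generalize hR : xs.foldl (fun b i => if pvGtA (key i) (key b) then i else b) best = r at hmem hspec ⊢
      constructor
      · rcases List.mem_cons.mp hmem with rfl | h
        · exact List.mem_cons_self
        · exact List.mem_cons_of_mem _ (List.mem_cons_of_mem _ h)
      · intro j hj hne
        rcases List.mem_cons.mp hj with rfl | hj'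
        · exact hspec j List.mem_cons_self hne
        rcases List.mem_cons.mp hj' with rfl | hj''
        · -- j = x
          by_cases hrb : r = best
          · subst hrb
            rcases hbx_key with h' | h'
            · left; exact h'
            · right; exact ⟨h', hbx⟩
          · have hrxs : r ∈ xs := by
              rcases List.mem_cons.mp hmem with h' | h'
              · exact absurd h' hrb
              · exact h'
            have hbr : best < r := lt_trans hbx (hx r hrxs)
            rcases hspec best List.mem_cons_self (fun e => hrb e.symm) with h' | ⟨_, h''⟩
            · rcases hbx_key with h2 | h2
              · left; exact pvGtA_transL _ _ _ h' h2
              · left; rw [← h2]; exact h'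
            · omega
        · exact hspec j (List.mem_cons_of_mem _ hj'') hne

-- the spec instantiated at pvArgmaxA
theorem pvArgmaxA_spec (out : List PVBatch) (hne : out ≠ []) :
    pvArgmaxA out < out.length ∧
      ∀ j < out.length, j ≠ pvArgmaxA out →
        pvGtA (pvKeyA out (pvArgmaxA out)) (pvKeyA out j) = true ∨
          (pvKeyA out (pvArgmaxA out) = pvKeyA out j ∧ pvArgmaxA out < j) := by
  obtain ⟨m, hm⟩ : ∃ m, out.length = m + 1 :=
    ⟨out.length - 1, by have := List.length_pos_iff.mpr hne; omega⟩
  have hrange : List.range out.length = 0 :: (List.range m).map (· + 1) := by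
    rw [hm, List.range_succ_eq_map]
  have hfold : pvArgmaxA out
      = ((List.range m).map (· + 1)).foldl
          (fun b i => if pvGtA (pvKeyA out i) (pvKeyA out b) then i else b) 0 := by
    unfold pvArgmaxA
    rw [hrange]
    simp [pvGtA_irrefl]
  have hpw : (0 :: (List.range m).map (· + 1)).Pairwise (· < ·) := by
    rw [List.pairwise_cons]
    constructor
    · intro a ha
      simp only [List.mem_map, List.mem_range] at ha
      omega
    · rw [List.pairwise_map]
      exact (List.pairwise_lt_range).imp (by omega)
  obtain ⟨hmem, hspec⟩ := pvArgmax_fold_spec (pvKeyA out) ((List.range m).map (· + 1)) 0 hpw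
  rw [← hfold] at hmem hspec
  constructor
  · rcases List.mem_cons.mp hmem with h | h
    · rw [h]; omega
    · simp only [List.mem_map, List.mem_range] at h; omega
  · intro j hj hne
    have hjmem : j ∈ 0 :: (List.range m).map (· + 1) := by
      rcases Nat.eq_zero_or_pos j with rfl | hp
      · exact List.mem_cons_self
      · refine List.mem_cons_of_mem _ ?_
        simp only [List.mem_map, List.mem_range]
        exact ⟨j - 1, by omega, by omega⟩
    exact hspec j hjmem (fun e => hne e)


-- ---- ghost version of A: each batch tagged with its position path ----
def pvInitP : Int → List PVBatch → List (List Int × PVBatch)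
  | _, [] => []
  | i, b :: bs => if b.isEmpty then pvInitP (i+1) bs else ([i], b) :: pvInitP (i+1) bs

def pvLoopP : Nat → Int → List (List Int × PVBatch) → List (List Int × PVBatch)
  | 0, _, s => s
  | fuel+1, target, s =>
    if (s.length : Int) < target then
      if (s.getD (pvArgmaxA (s.map (·.2))) ([], [])).2.length ≤ 1 then s
      else
        pvLoopP fuel target
          (s.take (pvArgmaxA (s.map (·.2))) ++
            [((s.getD (pvArgmaxA (s.map (·.2))) ([], [])).1 ++ [0],
              (s.getD (pvArgmaxA (s.map (·.2))) ([], [])).2.take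
                ((s.getD (pvArgmaxA (s.map (·.2))) ([], [])).2.length / 2)),
             ((s.getD (pvArgmaxA (s.map (·.2))) ([], [])).1 ++ [1],
              (s.getD (pvArgmaxA (s.map (·.2))) ([], [])).2.drop
                ((s.getD (pvArgmaxA (s.map (·.2))) ([], [])).2.length / 2))] ++
            s.drop (pvArgmaxA (s.map (·.2)) + 1))
    else s

theorem pvLoopB_succ (n : Nat) (target : Int) (it : PVItem) (rest : List PVItem) :
    pvLoopB (n+1) target (it :: rest) =
      if ((it :: rest).length : Int) < target then
        if it.2.2.2.length ≤ 1 then it :: rest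
        else
          pvLoopB n target
            (pvInsort (pvInsort rest
                (-(↑(it.2.2.2.length / 2) : Int), -pvToksB (it.2.2.2.take (it.2.2.2.length / 2)),
                  it.2.2.1 ++ [0], it.2.2.2.take (it.2.2.2.length / 2)))
              ((↑(it.2.2.2.length / 2) : Int) - (it.2.2.2.length : Int),
                pvToksB (it.2.2.2.take (it.2.2.2.length / 2)) + it.2.1,
                it.2.2.1 ++ [1], it.2.2.2.drop (it.2.2.2.length / 2)))
      else it :: rest := rfl

theorem pvInitP_snd (bs : List PVBatch) : ∀ i, (pvInitP i bs).map (·.2) = bs.filter (fun b => !b.isEmpty) := by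
  induction bs with
  | nil => intro i; rfl
  | cons b bs ih =>
    intro i
    rw [List.filter_cons]
    by_cases hb : b.isEmpty
    · simp [pvInitP, hb, ih]
    · simp [pvInitP, hb, ih]

theorem pvGetD_map_snd (s : List (List Int × PVBatch)) (i : Nat) :
    (s.map (·.2)).getD i [] = (s.getD i ([], [])).2 := by
  by_cases h : i < s.length
  · simp [List.getD, h]
  · have h1 : s.length ≤ i := Nat.le_of_not_lt h
    simp [List.getD, List.getElem?_eq_none h1, List.getElem?_eq_none (by simpa using h1 : (s.map (·.2)).length ≤ i)]

theorem pvLoopP_snd : ∀ (fuel : Nat) (t : Int) (s : List (List Int × PVBatch)),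
    (pvLoopP fuel t s).map (·.2) = pvLoopA fuel t (s.map (·.2)) := by
  intro fuel
  induction fuel with
  | zero => intro t s; rfl
  | succ n ih =>
    intro t s
    rw [pvLoopP, pvLoopA]
    simp only [List.length_map]
    by_cases hlt : (s.length : Int) < t
    · rw [if_pos hlt, if_pos hlt]
      rw [pvGetD_map_snd]
      by_cases hle : (s.getD (pvArgmaxA (s.map (·.2))) ([], [])).2.length ≤ 1
      · rw [if_pos hle, if_pos hle]
      · rw [if_neg hle, if_neg hle, ih]
        congr 1
        simp [List.map_take, List.map_drop]
    · rw [if_neg hlt, if_neg hlt]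

theorem pvInitP_mem (bs : List PVBatch) : ∀ (i : Int) (x : List Int × PVBatch),
    x ∈ pvInitP i bs → ∃ j, x.1 = [j] ∧ i ≤ j := by
  induction bs with
  | nil => intro i x hx; simp [pvInitP] at hx
  | cons b bs ih =>
    intro i x hx
    rw [pvInitP] at hx
    by_cases hb : b.isEmpty
    · rw [if_pos hb] at hx
      obtain ⟨j, h1, h2⟩ := ih (i+1) x hx
      exact ⟨j, h1, by omega⟩
    · rw [if_neg hb] at hx
      rcases List.mem_cons.mp hx with rfl | hx'
      · exact ⟨i, rfl, le_refl i⟩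
      · obtain ⟨j, h1, h2⟩ := ih (i+1) x hx'
        exact ⟨j, h1, by omega⟩

-- pairwise 'strictly below' of the tagged initial state
theorem pvInitP_pw (bs : List PVBatch) : ∀ i, (pvInitP i bs).Pairwise (fun a b => pvLtAt a.1 b.1) := by
  induction bs with
  | nil => intro i; simp [pvInitP]
  | cons b bs ih =>
    intro i
    rw [pvInitP]
    by_cases hb : b.isEmpty
    · rw [if_pos hb]; exact ih (i+1)
    · rw [if_neg hb]
      rw [List.pairwise_cons]
      refine ⟨?_, ih (i+1)⟩
      intro a ha
      obtain ⟨j, h1, h2⟩ := pvInitP_mem bs (i+1) a ha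
      rw [h1]
      exact ⟨0, by simp, by simp, rfl, by simpa using by omega⟩


theorem pvToksB_eq_A : pvToksB = pvToksA := rfl

theorem pvToks_split (b : PVBatch) (m : Nat) :
    pvToksA (b.drop m) = pvToksA b - pvToksA (b.take m) := by
  have hsum : ∀ (l : PVBatch) (a : Int),
      l.foldl (fun acc s => acc + PySem.Dict.getD (PySem.Dict.mk s) "estimated_tokens" 0) a
        = a + (l.map (fun s => PySem.Dict.getD (PySem.Dict.mk s) "estimated_tokens" 0)).sum := by
    intro l
    induction l with
    | nil => simp
    | cons s ss ih => intro a; simp [ih]; ring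
  have h1 : pvToksA b = pvToksA (b.take m) + pvToksA (b.drop m) := by
    conv_lhs => rw [← List.take_append_drop m b]
    simp [pvToksA, hsum]
  omega

theorem pvKeyA_eq (s : List (List Int × PVBatch)) (j : Nat) :
    pvKeyA (s.map (·.2)) j = pvAKey (s.getD j ([], [])) := by
  unfold pvKeyA pvAKey
  rw [pvGetD_map_snd]

theorem pvSorted_head (l : List PVItem) (e : PVItem)
    (hs : l.Pairwise (fun a b => pvKeyLt a b = true))
    (he : e ∈ l) (hmin : ∀ x ∈ l, x ≠ e → pvKeyLt e x = true) :
    ∃ t, l = e :: t := by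
  cases l with
  | nil => simp at he
  | cons x t =>
    by_cases hx : x = e
    · exact ⟨t, by rw [hx]⟩
    · exfalso
      have h1 : pvKeyLt e x = true := hmin x List.mem_cons_self hx
      have he' : e ∈ t := by
        rcases List.mem_cons.mp he with rfl | h
        · exact absurd rfl hx
        · exact h
      exact pvKeyLt_asymm _ _ h1 ((List.pairwise_cons.mp hs).1 e he')


-- ---- main simulation: B's sorted priority list tracks A's in-place list ----
theorem pvLoop_sim : ∀ (fuel : Nat) (t : Int) (s : List (List Int × PVBatch)) (items : List PVItem),
    items.Perm (s.map pvDecor) →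
    items.Pairwise (fun a b => pvKeyLt a b = true) →
    s.Pairwise (fun a b => pvLtAt a.1 b.1) →
    (pvLoopB fuel t items).Perm ((pvLoopP fuel t s).map pvDecor) ∧
      (pvLoopB fuel t items).Pairwise (fun a b => pvKeyLt a b = true) ∧
      (pvLoopP fuel t s).Pairwise (fun a b => pvLtAt a.1 b.1) := by
  intro fuel
  induction fuel with
  | zero => intro t s items hperm hsort hpw; exact ⟨hperm, hsort, hpw⟩
  | succ n ih =>
    intro t s items hperm hsort hpw
    cases items with
    | nil =>
      have hs0 : s = [] := by
        have := hperm.length_eq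
        simp at this
        exact List.length_eq_zero_iff.mp this.symm
      subst hs0
      rw [pvLoopB, pvLoopP]
      refine ⟨?_, ?_, ?_⟩ <;> (try split_ifs) <;> simp_all [List.getD]
    | cons it rest =>
      have hlen : (it :: rest).length = s.length := by
        have := hperm.length_eq; simpa using this
      have hsne : s ≠ [] := by
        intro h; subst h; simp at hlen
      have hmapne : s.map (fun x => x.2) ≠ [] := by simpa using hsne
      obtain ⟨hi, hspec⟩ := pvArgmaxA_spec (s.map (·.2)) hmapne
      rw [List.length_map] at hi
      have hgetD : s.getD (pvArgmaxA (s.map (·.2))) ([], []) = s[pvArgmaxA (s.map (·.2))] :=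
        List.getD_eq_getElem s ([], []) hi
      have hdec : s = s.take (pvArgmaxA (s.map (·.2))) ++
          s[pvArgmaxA (s.map (·.2))] :: s.drop (pvArgmaxA (s.map (·.2)) + 1) := by
        conv_lhs => rw [← List.take_append_drop (pvArgmaxA (s.map (·.2))) s,
          List.drop_eq_getElem_cons hi]
      -- the decorated argmax element is the strict minimum of items
      have hkey : ∀ (j : Nat) (hj : j < s.length), j ≠ pvArgmaxA (s.map (·.2)) →
          pvKeyLt (pvDecor s[pvArgmaxA (s.map (·.2))]) (pvDecor (s[j]'hj)) = true := by
        intro j hj hne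
        have := hspec j (by simpa using hj) hne
        rw [pvKeyA_eq, pvKeyA_eq, hgetD, List.getD_eq_getElem s ([], []) hj] at this
        rw [pvKeyLt_decor]
        rcases this with h | ⟨h1, h2⟩
        · exact Or.inl h
        · refine Or.inr ⟨h1, pvLtAt_pathLt _ _ ?_⟩
          rw [List.pairwise_iff_getElem] at hpw
          exact hpw _ _ hi hj h2
      have hemem : pvDecor s[pvArgmaxA (s.map (·.2))] ∈ it :: rest := by
        rw [hperm.mem_iff]
        exact List.mem_map_of_mem (List.getElem_mem hi)
      have hmin : ∀ x ∈ it :: rest, x ≠ pvDecor s[pvArgmaxA (s.map (·.2))] →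
          pvKeyLt (pvDecor s[pvArgmaxA (s.map (·.2))]) x = true := by
        intro x hx hxe
        have hx' : x ∈ s.map pvDecor := hperm.mem_iff.mp hx
        obtain ⟨z, hz, rfl⟩ := List.mem_map.mp hx'
        obtain ⟨j, hj, rfl⟩ := List.mem_iff_getElem.mp hz
        have hji : j ≠ pvArgmaxA (s.map (·.2)) := by
          intro h; subst h; exact hxe rfl
        exact hkey j hj hji
      obtain ⟨t0, ht0⟩ := pvSorted_head _ _ hsort hemem hmin
      obtain ⟨hit, hrest⟩ := List.cons_eq_cons.mp ht0
      subst hrest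
      -- rest is a permutation of the decorated remainder
      have hrest_perm : rest.Perm ((s.take (pvArgmaxA (s.map (·.2))) ++
          s.drop (pvArgmaxA (s.map (·.2)) + 1)).map pvDecor) := by
        have h1 : (it :: rest).Perm (pvDecor s[pvArgmaxA (s.map (·.2))] ::
            (s.take (pvArgmaxA (s.map (·.2))) ++ s.drop (pvArgmaxA (s.map (·.2)) + 1)).map pvDecor) := by
          refine hperm.trans ?_
          conv_lhs => rw [hdec]
          rw [List.map_append, List.map_cons, List.map_append]
          exact List.perm_middle
        rw [hit] at h1
        exact h1.cons_inv
      rw [pvLoopB_succ, pvLoopP]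
      have hlen' : ((it :: rest).length : Int) = (s.length : Int) := by rw [hlen]
      rw [hlen']
      by_cases hlt : (s.length : Int) < t
      · rw [if_pos hlt, if_pos hlt]
        subst hit
        rw [hgetD]
        simp only [pvDecor]
        by_cases hle : s[pvArgmaxA (s.map (·.2))].2.length ≤ 1
        · rw [if_pos hle, if_pos hle]
          exact ⟨hperm, hsort, hpw⟩
        · rw [if_neg hle, if_neg hle]
          -- names: i = argmax, z = s[i], p = z.1, b = z.2, mid = b.length / 2
          have hmidle : s[pvArgmaxA (s.map (·.2))].2.length / 2 ≤ s[pvArgmaxA (s.map (·.2))].2.length :=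
            Nat.div_le_self _ _
          have hpw_dec : (s.take (pvArgmaxA (s.map (·.2))) ++
              s[pvArgmaxA (s.map (·.2))] :: s.drop (pvArgmaxA (s.map (·.2)) + 1)).Pairwise
                (fun a b => pvLtAt a.1 b.1) := hdec ▸ hpw
          rw [List.pairwise_append] at hpw_dec
          obtain ⟨hpw_take, hpw_cons, hcross⟩ := hpw_dec
          obtain ⟨hhead, hpw_drop⟩ := List.pairwise_cons.mp hpw_cons
          have hrest_sorted : rest.Pairwise (fun a b => pvKeyLt a b = true) :=
            (List.pairwise_cons.mp hsort).2
          -- path comparability of the two children with everything left in the state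
          have hcmp_z : ∀ z ∈ s.take (pvArgmaxA (s.map (·.2))) ++ s.drop (pvArgmaxA (s.map (·.2)) + 1),
              ∀ (c : Int),
              pvPathLt (s[pvArgmaxA (s.map (·.2))].1 ++ [c]) z.1 = true ∨
                pvPathLt z.1 (s[pvArgmaxA (s.map (·.2))].1 ++ [c]) = true := by
            intro z hz c
            rcases List.mem_append.mp hz with hz' | hz'
            · right
              exact pvLtAt_pathLt _ _ (pvLtAt_append_right _ _ _ (hcross z hz' _ List.mem_cons_self))
            · left
              exact pvLtAt_pathLt _ _ (pvLtAt_append_left _ _ _ (hhead z hz'))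
          have hrest_mem : ∀ y ∈ rest, ∃ z ∈ s.take (pvArgmaxA (s.map (·.2))) ++ s.drop (pvArgmaxA (s.map (·.2)) + 1),
              y = pvDecor z := by
            intro y hy
            obtain ⟨z, hz, hzy⟩ := List.mem_map.mp (hrest_perm.mem_iff.mp hy)
            exact ⟨z, hz, hzy.symm⟩
          -- children as decorated entries
          have hc0 : ((-(((s[pvArgmaxA (s.map (·.2))].2.length / 2 : Nat) : Int)),
                -pvToksB (s[pvArgmaxA (s.map (·.2))].2.take (s[pvArgmaxA (s.map (·.2))].2.length / 2)),
                s[pvArgmaxA (s.map (·.2))].1 ++ [0],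
                s[pvArgmaxA (s.map (·.2))].2.take (s[pvArgmaxA (s.map (·.2))].2.length / 2)) : PVItem)
              = pvDecor (s[pvArgmaxA (s.map (·.2))].1 ++ [0],
                  s[pvArgmaxA (s.map (·.2))].2.take (s[pvArgmaxA (s.map (·.2))].2.length / 2)) := by
            simp [pvDecor, pvToksB_eq_A, List.length_take, Nat.min_eq_left hmidle]
          have hc1 : ((((s[pvArgmaxA (s.map (·.2))].2.length / 2 : Nat) : Int) - (s[pvArgmaxA (s.map (·.2))].2.length : Int),
                pvToksB (s[pvArgmaxA (s.map (·.2))].2.take (s[pvArgmaxA (s.map (·.2))].2.length / 2)) +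
                  -pvToksA s[pvArgmaxA (s.map (·.2))].2,
                s[pvArgmaxA (s.map (·.2))].1 ++ [1],
                s[pvArgmaxA (s.map (·.2))].2.drop (s[pvArgmaxA (s.map (·.2))].2.length / 2)) : PVItem)
              = pvDecor (s[pvArgmaxA (s.map (·.2))].1 ++ [1],
                  s[pvArgmaxA (s.map (·.2))].2.drop (s[pvArgmaxA (s.map (·.2))].2.length / 2)) := by
            simp only [pvDecor, pvToksB_eq_A, List.length_drop, pvToks_split, Prod.mk.injEq]
            and_intros <;> first | rfl | omega | trivial
          rw [hc0, hc1]
          -- permutation of the new states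
          have hins_perm : (pvInsort (pvInsort rest
                (pvDecor (s[pvArgmaxA (s.map (·.2))].1 ++ [0],
                  s[pvArgmaxA (s.map (·.2))].2.take (s[pvArgmaxA (s.map (·.2))].2.length / 2))))
                (pvDecor (s[pvArgmaxA (s.map (·.2))].1 ++ [1],
                  s[pvArgmaxA (s.map (·.2))].2.drop (s[pvArgmaxA (s.map (·.2))].2.length / 2)))).Perm
              (pvDecor (s[pvArgmaxA (s.map (·.2))].1 ++ [1],
                  s[pvArgmaxA (s.map (·.2))].2.drop (s[pvArgmaxA (s.map (·.2))].2.length / 2)) ::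
                pvDecor (s[pvArgmaxA (s.map (·.2))].1 ++ [0],
                  s[pvArgmaxA (s.map (·.2))].2.take (s[pvArgmaxA (s.map (·.2))].2.length / 2)) :: rest) := by
            rw [pvInsort_eq, pvInsort_eq]
            exact (pvInsG_perm _ _ _).trans (((pvInsG_perm _ _ _).cons _).trans (List.Perm.refl _))
          have hperm' : (pvInsort (pvInsort rest
                (pvDecor (s[pvArgmaxA (s.map (·.2))].1 ++ [0],
                  s[pvArgmaxA (s.map (·.2))].2.take (s[pvArgmaxA (s.map (·.2))].2.length / 2))))
                (pvDecor (s[pvArgmaxA (s.map (·.2))].1 ++ [1],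
                  s[pvArgmaxA (s.map (·.2))].2.drop (s[pvArgmaxA (s.map (·.2))].2.length / 2)))).Perm
              ((s.take (pvArgmaxA (s.map (·.2))) ++
                ([(s[pvArgmaxA (s.map (·.2))].1 ++ [0],
                  s[pvArgmaxA (s.map (·.2))].2.take (s[pvArgmaxA (s.map (·.2))].2.length / 2)),
                 (s[pvArgmaxA (s.map (·.2))].1 ++ [1],
                  s[pvArgmaxA (s.map (·.2))].2.drop (s[pvArgmaxA (s.map (·.2))].2.length / 2))] :
                   List (List Int × PVBatch)) ++
                s.drop (pvArgmaxA (s.map (·.2)) + 1)).map pvDecor) := by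
            refine hins_perm.trans ?_
            simp only [List.append_assoc, List.map_append, List.map_cons,
              List.cons_append, List.nil_append]
            refine (List.Perm.swap _ _ _).trans ?_
            refine (((hrest_perm.trans (by rw [List.map_append])).cons _).cons _).trans ?_
            exact (List.Perm.cons _ List.perm_middle.symm).trans List.perm_middle.symm
          -- sortedness of the new priority list
          have hcmp0 : ∀ y ∈ rest,
              pvKeyLt (pvDecor (s[pvArgmaxA (s.map (·.2))].1 ++ [0],
                s[pvArgmaxA (s.map (·.2))].2.take (s[pvArgmaxA (s.map (·.2))].2.length / 2))) y = true ∨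
              pvKeyLt y (pvDecor (s[pvArgmaxA (s.map (·.2))].1 ++ [0],
                s[pvArgmaxA (s.map (·.2))].2.take (s[pvArgmaxA (s.map (·.2))].2.length / 2))) = true := by
            intro y hy
            obtain ⟨z, hz, rfl⟩ := hrest_mem y hy
            exact pvKeyLt_connex _ _ ((hcmp_z z hz 0).symm.imp id id).symm
          have hsorted0 : (pvInsort rest
              (pvDecor (s[pvArgmaxA (s.map (·.2))].1 ++ [0],
                s[pvArgmaxA (s.map (·.2))].2.take (s[pvArgmaxA (s.map (·.2))].2.length / 2)))).Pairwise
              (fun a b => pvKeyLt a b = true) := by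
            rw [pvInsort_eq]
            exact pvInsG_sorted _ pvKeyLt_trans _ _ hrest_sorted hcmp0
          have hsort' : (pvInsort (pvInsort rest
                (pvDecor (s[pvArgmaxA (s.map (·.2))].1 ++ [0],
                  s[pvArgmaxA (s.map (·.2))].2.take (s[pvArgmaxA (s.map (·.2))].2.length / 2))))
                (pvDecor (s[pvArgmaxA (s.map (·.2))].1 ++ [1],
                  s[pvArgmaxA (s.map (·.2))].2.drop (s[pvArgmaxA (s.map (·.2))].2.length / 2)))).Pairwise
              (fun a b => pvKeyLt a b = true) := by
            rw [pvInsort_eq]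
            refine pvInsG_sorted _ pvKeyLt_trans _ _ hsorted0 ?_
            intro y hy
            rw [pvInsort_eq] at hy
            rcases List.mem_cons.mp ((pvInsG_perm _ _ _).mem_iff.mp hy) with rfl | hy'
            · exact (pvKeyLt_connex _ _ (Or.inr (pvLtAt_pathLt _ _
                (pvLtAt_child s[pvArgmaxA (s.map (·.2))].1 0 1 (by norm_num))))).symm.symm
            · obtain ⟨z, hz, rfl⟩ := hrest_mem y hy'
              exact pvKeyLt_connex _ _ ((hcmp_z z hz 1).symm.imp id id).symm
          -- pairwise 'strictly below' of the new ghost state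
          have hpw' : ((s.take (pvArgmaxA (s.map (·.2))) ++
                ([(s[pvArgmaxA (s.map (·.2))].1 ++ [0],
                  s[pvArgmaxA (s.map (·.2))].2.take (s[pvArgmaxA (s.map (·.2))].2.length / 2)),
                 (s[pvArgmaxA (s.map (·.2))].1 ++ [1],
                  s[pvArgmaxA (s.map (·.2))].2.drop (s[pvArgmaxA (s.map (·.2))].2.length / 2))] :
                   List (List Int × PVBatch)) ++
                s.drop (pvArgmaxA (s.map (·.2)) + 1))).Pairwise (fun a b => pvLtAt a.1 b.1) := by
            rw [List.append_assoc, List.pairwise_append]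
            refine ⟨hpw_take, ?_, ?_⟩
            · rw [List.cons_append, List.cons_append, List.nil_append,
                List.pairwise_cons, List.pairwise_cons]
              refine ⟨?_, ?_, hpw_drop⟩
              · intro z hz
                rcases List.mem_cons.mp hz with rfl | hz'
                · exact pvLtAt_child _ 0 1 (by norm_num)
                · exact pvLtAt_append_left _ _ _ (hhead z hz')
              · intro z hz
                exact pvLtAt_append_left _ _ _ (hhead z hz)
            · intro x hx y hy
              rw [List.cons_append, List.cons_append, List.nil_append] at hy
              rcases List.mem_cons.mp hy with rfl | hy'
              · exact pvLtAt_append_right _ _ _ (hcross x hx _ List.mem_cons_self)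
              rcases List.mem_cons.mp hy' with rfl | hy''
              · exact pvLtAt_append_right _ _ _ (hcross x hx _ List.mem_cons_self)
              · exact hcross x hx y (List.mem_cons_of_mem _ hy'')
          exact ih t _ _ hperm' hsort' hpw'
      · rw [if_neg hlt, if_neg hlt]
        exact ⟨hperm, hsort, hpw⟩


-- ---- initialisation: B's insort-fold builds the sorted decoration of the tagged start state ----
theorem pvInit_fold (bs : List PVBatch) : ∀ (i : Int) (acc : List PVItem) (s0 : List (List Int × PVBatch)),
    acc.Perm (s0.map pvDecor) →
    acc.Pairwise (fun a b => pvKeyLt a b = true) →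
    (s0 ++ pvInitP i bs).Pairwise (fun a b => pvLtAt a.1 b.1) →
    ((PySem.List.enumerate bs i).foldl
        (fun items pb => if pb.2.isEmpty then items
          else pvInsort items (-(pb.2.length : Int), -(pvToksB pb.2), [pb.1], pb.2)) acc).Perm
        ((s0 ++ pvInitP i bs).map pvDecor) ∧
      ((PySem.List.enumerate bs i).foldl
        (fun items pb => if pb.2.isEmpty then items
          else pvInsort items (-(pb.2.length : Int), -(pvToksB pb.2), [pb.1], pb.2)) acc).Pairwise
        (fun a b => pvKeyLt a b = true) := by
  induction bs with
  | nil =>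
    intro i acc s0 hperm hsort _
    rw [PySem.List.enumerate_nil]
    simpa [pvInitP] using ⟨hperm, hsort⟩
  | cons b bs ih =>
    intro i acc s0 hperm hsort hpw
    rw [PySem.List.enumerate_cons, List.foldl_cons]
    by_cases hb : b.isEmpty
    · rw [if_pos hb]
      have hinit : pvInitP i (b :: bs) = pvInitP (i+1) bs := by rw [pvInitP, if_pos hb]
      rw [hinit] at hpw ⊢
      exact ih (i+1) acc s0 hperm hsort hpw
    · rw [if_neg hb]
      have hinit : pvInitP i (b :: bs) = ([i], b) :: pvInitP (i+1) bs := by rw [pvInitP, if_neg hb]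
      rw [hinit] at hpw ⊢
      have hc : ((-(b.length : Int), -(pvToksB b), [i], b) : PVItem) = pvDecor ([i], b) := rfl
      rw [hc]
      -- cross relations of the new element with everything already inserted
      rw [show s0 ++ ([i], b) :: pvInitP (i+1) bs = s0 ++ [(([i] : List Int), b)] ++ pvInitP (i+1) bs by
        rw [List.append_assoc, List.singleton_append]] at hpw ⊢
      have hcross : ∀ z ∈ s0, pvLtAt z.1 [i] := by
        intro z hz
        rw [List.append_assoc, List.pairwise_append] at hpw
        exact hpw.2.2 z hz ([i], b) (by simp)
      have hsort' : (pvInsort acc (pvDecor ([i], b))).Pairwise (fun a b => pvKeyLt a b = true) := by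
        rw [pvInsort_eq]
        refine pvInsG_sorted _ pvKeyLt_trans _ _ hsort ?_
        intro y hy
        obtain ⟨z, hz, rfl⟩ := List.mem_map.mp (hperm.mem_iff.mp hy)
        exact (pvKeyLt_connex (pvDecor z) (pvDecor ([i], b))
          (Or.inl (pvLtAt_pathLt _ _ (hcross z hz)))).symm
      have hperm' : (pvInsort acc (pvDecor ([i], b))).Perm ((s0 ++ [(([i] : List Int), b)]).map pvDecor) := by
        rw [pvInsort_eq]
        refine (pvInsG_perm _ _ _).trans ?_
        rw [List.map_append, List.map_cons, List.map_nil]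
        exact (hperm.cons _).trans (List.perm_append_singleton _ _).symm
      have := ih (i+1) (pvInsort acc (pvDecor ([i], b))) (s0 ++ [(([i] : List Int), b)]) hperm' hsort' hpw
      simpa using this

theorem pvInit_sim (batches : List PVBatch) :
    (pvInitB batches).Perm ((pvInitP 0 batches).map pvDecor) ∧
      (pvInitB batches).Pairwise (fun a b => pvKeyLt a b = true) := by
  have h := pvInit_fold batches 0 [] [] (List.Perm.refl _) List.Pairwise.nil
    (by simpa using pvInitP_pw batches 0)
  simpa [pvInitB] using h

-- ---- a permutation of a strictly sorted list that is itself strictly sorted is equal to it ----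
theorem pvPerm_sorted_eq (lt : PVItem → PVItem → Bool)
    (hasym : ∀ a b, lt a b = true → lt b a = true → False) :
    ∀ (l1 l2 : List PVItem), l1.Perm l2 →
      l1.Pairwise (fun a b => lt a b = true) → l2.Pairwise (fun a b => lt a b = true) → l1 = l2 := by
  intro l1
  induction l1 with
  | nil =>
    intro l2 hp _ _
    exact (List.Perm.eq_nil hp.symm).symm
  | cons a t1 ih =>
    intro l2 hp h1 h2
    cases l2 with
    | nil => simpa using hp.length_eq
    | cons b t2 =>
      by_cases hab : a = b
      · subst hab
        rw [ih t2 hp.cons_inv (List.pairwise_cons.mp h1).2 (List.pairwise_cons.mp h2).2]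
      · exfalso
        have ha : a ∈ t2 := by
          have := hp.mem_iff.mp List.mem_cons_self
          rcases List.mem_cons.mp this with h | h
          · exact absurd h hab
          · exact h
        have hb : b ∈ t1 := by
          have := hp.symm.mem_iff.mp List.mem_cons_self
          rcases List.mem_cons.mp this with h | h
          · exact absurd h.symm hab
          · exact h
        exact hasym a b ((List.pairwise_cons.mp h1).1 b hb) ((List.pairwise_cons.mp h2).1 a ha)

-- ---- the final reordering pass rebuilds exactly the ghost state's order ----
theorem pvFinal_order (items : List PVItem) (sf : List (List Int × PVBatch))
    (hperm : items.Perm (sf.map pvDecor))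
    (hpw : sf.Pairwise (fun a b => pvLtAt a.1 b.1)) :
    items.foldl pvOrderIns [] = sf.map pvDecor := by
  have hfun : pvOrderIns = pvInsG (fun a b => pvPathLt a.2.2.1 b.2.2.1) :=
    funext (fun l => funext (fun it => pvOrderIns_eq l it))
  have htr : ∀ a b c : PVItem, pvPathLt a.2.2.1 b.2.2.1 = true → pvPathLt b.2.2.1 c.2.2.1 = true →
      pvPathLt a.2.2.1 c.2.2.1 = true := fun a b c => pvPathLt_trans _ _ _
  have hcmpm : (sf.map pvDecor).Pairwise
      (fun a b => pvPathLt a.2.2.1 b.2.2.1 = true ∨ pvPathLt b.2.2.1 a.2.2.1 = true) := by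
    rw [List.pairwise_map]
    exact hpw.imp (fun h => Or.inl (pvLtAt_pathLt _ _ h))
  have hcmp : items.Pairwise
      (fun a b => pvPathLt a.2.2.1 b.2.2.1 = true ∨ pvPathLt b.2.2.1 a.2.2.1 = true) :=
    (hperm.pairwise_iff (fun h => Or.symm h)).mpr hcmpm
  obtain ⟨hsorted, hpermr⟩ := pvInsG_fold (fun a b => pvPathLt a.2.2.1 b.2.2.1) htr items []
    List.Pairwise.nil hcmp (fun x hx => absurd hx (List.not_mem_nil))
  rw [hfun]
  refine pvPerm_sorted_eq (fun a b => pvPathLt a.2.2.1 b.2.2.1)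
    (fun a b h1 h2 => pvPathLt_asymm _ _ h1 h2) _ _ ?_ hsorted ?_
  · exact (hpermr.trans (by simp)).trans hperm
  · rw [List.pairwise_map]
    exact hpw.imp (fun h => pvLtAt_pathLt _ _ h)

theorem pv_main (batches : List (List (List (String × Int)))) (target_count : Int) :
    rebalance_batches_to_count_py batches target_count
      = rebalance_batches_to_count_py_alt batches target_count := by
  unfold rebalance_batches_to_count_py rebalance_batches_to_count_py_alt
  obtain ⟨hp0, hs0⟩ := pvInit_sim batches
  have hlen0 : (pvInitB batches).length = (batches.filter (fun b => !b.isEmpty)).length := by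
    rw [hp0.length_eq, List.length_map]
    have := congrArg List.length (pvInitP_snd batches 0)
    simpa using this
  obtain ⟨hp, -, hpwf⟩ := pvLoop_sim (target_count - (pvInitB batches).length).toNat target_count
    (pvInitP 0 batches) (pvInitB batches) hp0 hs0 (pvInitP_pw batches 0)
  have hfin := pvFinal_order _ _ hp hpwf
  show pvLoopA (target_count - ((batches.filter (fun b => !b.isEmpty)).length : Int)).toNat
      target_count (batches.filter (fun b => !b.isEmpty))
    = ((pvLoopB (target_count - ((pvInitB batches).length : Int)).toNat target_count
        (pvInitB batches)).foldl pvOrderIns []).map (fun it => it.2.2.2)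
  rw [hfin, List.map_map,
    show ((fun it : PVItem => it.2.2.2) ∘ pvDecor) = (fun z : List Int × PVBatch => z.2) from rfl,
    pvLoopP_snd, pvInitP_snd, hlen0]

-- ===== VERDICT (by name: the statement is the Claim_ definition above) =====
theorem rebalance_batches_to_count_py_spec : Claim_equal_rebalance_batches_to_count_py := by
  intro batches target_count _ _
  unfold Spec_rebalance_batches_to_count_py
  exact pv_main batches target_count
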